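-- pv_equiv track=rewrite | github.com/louie-jones-strong/CalculatorGame-Solver | Solver/Operations.py | DoActionOnValue
-- ===== SOURCE A (Python) =====
-- def DoActionOnValue(inputValue):
-- 	isNegtive = inputValue < 0
-- 	if isNegtive:
-- 		inputValue *= -1
--
-- 	valueStr = str(inputValue)
--
-- 	valueList = list(valueStr)
--
-- 	newValueList = []
-- 	for item in valueList:
-- 		newValueList += [item]
--
-- 	valueList.reverse()
-- 	for item in valueList:
-- 		newValueList += [item]
--
-- 	valueStr = "".join(newValueList)
-- 	newValue = int(valueStr)
--
-- 	if isNegtive: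
-- 		newValue *= -1
--
-- 	return newValue
-- ===== SOURCE B (Python) =====
-- def DoActionOnValue(inputValue):
-- 	s = str(abs(inputValue))
-- 	mirrored = int(s + s[::-1])
-- 	return -mirrored if inputValue < 0 else mirrored
-- ===== Notes on version B (the rewrite author's own statement) =====
-- stated objective: simpler
-- what changed: Replaces A's negation flag, explicit char-by-char copy loop, in-place list reverse, second append loop and join with a three-line version: s = str(abs(x)), one int(s + s[::-1]) using slice reversal, and arithmetic sign restoration.
import Mathlib
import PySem

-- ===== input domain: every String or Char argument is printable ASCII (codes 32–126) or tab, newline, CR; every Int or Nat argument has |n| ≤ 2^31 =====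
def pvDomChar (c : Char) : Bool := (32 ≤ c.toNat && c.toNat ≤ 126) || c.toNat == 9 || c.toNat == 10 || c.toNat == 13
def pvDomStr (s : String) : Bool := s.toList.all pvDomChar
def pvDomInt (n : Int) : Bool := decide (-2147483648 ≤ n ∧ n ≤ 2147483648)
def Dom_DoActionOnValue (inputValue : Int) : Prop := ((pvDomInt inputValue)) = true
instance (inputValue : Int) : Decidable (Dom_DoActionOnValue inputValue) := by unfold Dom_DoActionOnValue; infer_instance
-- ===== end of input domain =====

-- B replaces A's hand-rolled char-list copy/reverse/join loops by direct string slicing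
-- (str(abs(x)); int(s + s[::-1])) with arithmetic sign handling: simpler, no explicit loops.

-- ===== PORT A =====
-- int(valueStr) is applied to a nonempty digit string, so it never raises;
-- the `.getD 0` default is unreachable (A is total).
def DoActionOnValue (inputValue : Int) : Int :=
  let isNegtive : Bool := decide (inputValue < 0)
  let inputValue1 : Int := if isNegtive then inputValue * -1 else inputValue
  let valueStr : String := PySem.Int.toStr inputValue1
  let valueList : List Char := valueStr.toList
  let newValueList : List Char := valueList.foldl (fun acc item => acc ++ [item]) []
  let valueList1 : List Char := valueList.reverse
  let newValueList1 : List Char := valueList1.foldl (fun acc item => acc ++ [item]) newValueList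
  let valueStr1 : String := String.ofList newValueList1   -- "".join(newValueList)
  let newValue : Int := (PySem.Int.ofStr? valueStr1).getD 0
  if isNegtive then newValue * -1 else newValue

-- ===== PORT B =====
-- int(s + s[::-1]) on a digit string never raises; the `.getD` defaults are unreachable.
def DoActionOnValue_alt (inputValue : Int) : Int :=
  let s : String := PySem.Int.toStr |inputValue|
  let rev : String := (PySem.Str.slice? s none none (-1)).getD ""   -- s[::-1]
  let mirrored : Int := (PySem.Int.ofStr? (s ++ rev)).getD 0
  if inputValue < 0 then -mirrored else mirrored

-- ===== PRECONDITION & SPEC =====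
def Spec_DoActionOnValue (inputValue : Int) (out : Int) : Prop := out = DoActionOnValue_alt inputValue
instance (inputValue : Int) (out : Int) : Decidable (Spec_DoActionOnValue inputValue out) := by unfold Spec_DoActionOnValue; infer_instance

-- ===== CLAIM (what is proved, stated in full; the proofs are below) =====
def Claim_equal_DoActionOnValue : Prop := ∀ (inputValue : Int), Dom_DoActionOnValue inputValue → Spec_DoActionOnValue inputValue (DoActionOnValue inputValue)

-- ===== LEMMAS AND PROOFS =====
theorem DoActionOnValue_eq_alt (x : Int) : DoActionOnValue x = DoActionOnValue_alt x := by
  unfold DoActionOnValue DoActionOnValue_alt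
  have habs : (if decide (x < 0) then x * -1 else x) = |x| := by
    rcases lt_or_ge x 0 with h | h
    · simp [h, abs_of_neg h]
    · simp [not_lt.mpr h, abs_of_nonneg h]
  simp only [habs, PySem.List.foldl_append_singleton, List.nil_append,
    PySem.Str.slice?_none_none_neg_one, Option.getD_some, PySem.Int.ofStr?,
    String.toList_append, String.toList_ofList]
  rcases lt_or_ge x 0 with h | h
  · simp [h]
  · simp [not_lt.mpr h]

-- ===== VERDICT (by name: the statement is the Claim_ definition above) =====
theorem DoActionOnValue_spec : Claim_equal_DoActionOnValue := by
  intro x _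
  unfold Spec_DoActionOnValue
  exact DoActionOnValue_eq_alt x
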